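-- pv_equiv track=rewrite | github.com/Aroton/AroMCP | src/aromcp/analysis_server/tools/cycle_detector.py | _is_duplicate_cycle
-- ===== SOURCE A (Python) =====
-- from typing import List, Set, Dict, Optional, Any
--
-- def _is_duplicate_cycle(new_cycle: List[str], existing_cycles: List[List[str]]) -> bool:
--     """Check if a cycle is already detected (considering rotations)."""
--     for existing_cycle in existing_cycles:
--         if len(new_cycle) == len(existing_cycle):
--             # Check all rotations of the cycle
--             for i in range(len(existing_cycle)):
--                 rotated = existing_cycle[i:] + existing_cycle[:i]
--                 if new_cycle == rotated:
--                     return True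
--     return False
-- ===== SOURCE B (Python) =====
-- def _is_prefix(pattern, text):
--     if len(pattern) > len(text):
--         return False
--     for a, b in zip(pattern, text):
--         if a != b:
--             return False
--     return True
--
--
-- def _occurs(pattern, text):
--     # contiguous-sublist search: slide a prefix check along text
--     while text:
--         if _is_prefix(pattern, text):
--             return True
--         text = text[1:]
--     return not pattern
--
--
-- def _is_duplicate_cycle(new_cycle, existing_cycles):
--     """Check if a cycle is already detected (considering rotations)."""
--     if not new_cycle:
--         return False
--     for existing_cycle in existing_cycles:
--         if len(existing_cycle) == len(new_cycle) and _occurs(new_cycle, existing_cycle + existing_cycle):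
--             return True
--     return False
-- ===== Notes on version B (the rewrite author's own statement) =====
-- stated objective: alternative
-- what changed: Replaces A's enumeration of every rotation (slice-and-concatenate each rotation, then whole-list compare) with the doubling trick: a cycle is a duplicate iff it occurs as a contiguous sublist of existing_cycle + existing_cycle, found by a sliding prefix scan.
import Mathlib
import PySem

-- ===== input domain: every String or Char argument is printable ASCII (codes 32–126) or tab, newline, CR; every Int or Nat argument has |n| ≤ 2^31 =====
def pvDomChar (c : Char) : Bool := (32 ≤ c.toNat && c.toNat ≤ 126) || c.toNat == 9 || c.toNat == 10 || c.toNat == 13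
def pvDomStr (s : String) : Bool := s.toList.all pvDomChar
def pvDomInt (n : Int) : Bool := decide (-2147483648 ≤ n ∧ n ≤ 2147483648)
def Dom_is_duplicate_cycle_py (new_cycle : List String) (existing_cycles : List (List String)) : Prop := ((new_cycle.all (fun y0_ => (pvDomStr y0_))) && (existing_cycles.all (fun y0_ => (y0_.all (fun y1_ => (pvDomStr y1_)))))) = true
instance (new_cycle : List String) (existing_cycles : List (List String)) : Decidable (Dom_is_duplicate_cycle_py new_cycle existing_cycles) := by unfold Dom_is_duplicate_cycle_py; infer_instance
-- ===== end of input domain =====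

-- B replaces A's per-rotation slice-and-compare with the doubling trick (sliding prefix scan
-- over existing_cycle + existing_cycle); alternative structure, same worst-case cost.

-- ===== PORT A =====
-- for existing_cycle in existing_cycles: if len equal, for i in range(len): rotated = ex[i:]+ex[:i]; if new == rotated: return True
def is_duplicate_cycle_py (new_cycle : List String) (existing_cycles : List (List String)) : Bool :=
  existing_cycles.any (fun existing_cycle =>
    if new_cycle.length == existing_cycle.length then
      (PySem.List.pyRange 0 (existing_cycle.length : Int) 1).any (fun i =>
        new_cycle == PySem.List.slice existing_cycle (some i) none ++
                     PySem.List.slice existing_cycle none (some i))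
    else false)

-- ===== PORT B =====
-- _is_prefix(pattern, text): length check, then elementwise zip compare
def pvIsPrefix (pattern text : List String) : Bool :=
  if pattern.length > text.length then false
  else (pattern.zip text).all (fun ab => ab.1 == ab.2)

-- _occurs(pattern, text): while text: if _is_prefix: True; text = text[1:]; return not pattern
def pvOccurs (pattern text : List String) : Bool :=
  match text with
  | [] => pattern.isEmpty
  | _ :: rest => pvIsPrefix pattern text || pvOccurs pattern rest

def is_duplicate_cycle_py_alt (new_cycle : List String) (existing_cycles : List (List String)) : Bool :=
  if new_cycle.isEmpty then false
  else existing_cycles.any (fun existing_cycle =>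
    existing_cycle.length == new_cycle.length &&
      pvOccurs new_cycle (existing_cycle ++ existing_cycle))

-- ===== PRECONDITION & SPEC =====
def Spec_is_duplicate_cycle_py (new_cycle : List String) (existing_cycles : List (List String)) (out : Bool) : Prop := out = is_duplicate_cycle_py_alt new_cycle existing_cycles
instance (new_cycle : List String) (existing_cycles : List (List String)) (out : Bool) : Decidable (Spec_is_duplicate_cycle_py new_cycle existing_cycles out) := by unfold Spec_is_duplicate_cycle_py; infer_instance

-- ===== CLAIM (what is proved, stated in full; the proofs are below) =====
def Claim_equal_is_duplicate_cycle_py : Prop := ∀ (new_cycle : List String) (existing_cycles : List (List String)), Dom_is_duplicate_cycle_py new_cycle existing_cycles → Spec_is_duplicate_cycle_py new_cycle existing_cycles (is_duplicate_cycle_py new_cycle existing_cycles)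

-- ===== LEMMAS AND PROOFS =====

-- B's hand-written prefix test is the library prefix test
lemma pvIsPrefix_eq (p t : List String) : pvIsPrefix p t = p.isPrefixOf t := by
  induction p generalizing t with
  | nil => simp [pvIsPrefix, List.isPrefixOf]
  | cons a p ih =>
    cases t with
    | nil => simp [pvIsPrefix, List.isPrefixOf]
    | cons b t =>
      simp only [pvIsPrefix, List.isPrefixOf, List.zip_cons_cons, List.all_cons,
        List.length_cons, gt_iff_lt, Nat.add_lt_add_iff_right]
      rw [← ih t]
      simp [pvIsPrefix, Bool.and_left_comm]

-- characterisation of the sliding scan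
lemma pvOccurs_iff (p t : List String) :
    pvOccurs p t = true ↔ ∃ k ≤ t.length, p <+: t.drop k := by
  induction t with
  | nil =>
    simp [pvOccurs, List.isEmpty_iff, List.prefix_nil]
  | cons x t ih =>
    simp only [pvOccurs, Bool.or_eq_true, ih, pvIsPrefix_eq, List.isPrefixOf_iff_prefix]
    constructor
    · rintro (h | ⟨k, hk, hp⟩)
      · exact ⟨0, by omega, by simpa using h⟩
      · exact ⟨k + 1, by simp; omega, by simpa using hp⟩
    · rintro ⟨k, hk, hp⟩
      cases k with
      | zero => exact Or.inl (by simpa using hp)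
      | succ k => exact Or.inr ⟨k, by simp at hk; omega, by simpa using hp⟩

-- characterisation of A's rotation scan
lemma rotScan_iff (new ex : List String) :
    ((PySem.List.pyRange 0 (ex.length : Int) 1).any (fun i =>
        new == PySem.List.slice ex (some i) none ++ PySem.List.slice ex none (some i)) = true)
      ↔ ∃ j : Nat, j < ex.length ∧ new = ex.drop j ++ ex.take j := by
  rw [List.any_eq_true]
  constructor
  · rintro ⟨i, hmem, hp⟩
    rw [PySem.List.mem_pyRange_one] at hmem
    obtain ⟨h0, h1⟩ := hmem
    refine ⟨i.toNat, by omega, ?_⟩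
    rw [PySem.List.slice_from ex h0, PySem.List.slice_to ex h0] at hp
    simpa using hp
  · rintro ⟨j, hj, hp⟩
    refine ⟨(j : Int), ?_, ?_⟩
    · rw [PySem.List.mem_pyRange_one]; constructor <;> [positivity; exact_mod_cast hj]
    · rw [PySem.List.slice_from ex (by positivity), PySem.List.slice_to ex (by positivity)]
      simpa using hp

-- the doubling trick: with equal lengths and nonempty new, occurrence in ex ++ ex ↔ some rotation
lemma doubling (new ex : List String) (hne : new ≠ []) (hlen : new.length = ex.length) :
    (∃ k ≤ (ex ++ ex).length, new <+: (ex ++ ex).drop k)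
      ↔ ∃ j : Nat, j < ex.length ∧ new = ex.drop j ++ ex.take j := by
  constructor
  · rintro ⟨k, hk, hp⟩
    have hlen2 : (ex ++ ex).length = ex.length + ex.length := by simp
    have hplen := hp.length_le
    have hdlen : ((ex ++ ex).drop k).length = ex.length + ex.length - k := by simp
    have hkle : k ≤ ex.length := by omega
    rw [List.drop_append_of_le_length hkle] at hp
    by_cases hkeq : k = ex.length
    · -- drop ex.length ex = [] : new <+: ex, equal lengths, so new = ex = rotation 0
      subst hkeq
      simp at hp
      have : new = ex := List.IsPrefix.eq_of_length hp hlen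
      refine ⟨0, ?_, by simpa using this⟩
      have : new.length ≠ 0 := by simpa using hne
      omega
    · have hklt : k < ex.length := by omega
      refine ⟨k, hklt, ?_⟩
      have hrot : (ex.drop k ++ ex.take k) <+: (ex.drop k ++ ex) :=
        (List.prefix_append_right_inj (ex.drop k)).mpr (List.take_prefix k ex)
      have hlens : new.length = (ex.drop k ++ ex.take k).length := by
        simp; omega
      -- both prefixes of the same list, equal lengths
      exact List.IsPrefix.eq_of_length
        (List.prefix_of_prefix_length_le hp hrot (by omega)) hlens
  · rintro ⟨j, hj, hp⟩
    refine ⟨j, by simp; omega, ?_⟩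
    rw [List.drop_append_of_le_length (by omega)]
    rw [hp]
    exact (List.prefix_append_right_inj (ex.drop j)).mpr (List.take_prefix j ex)

-- per-cycle agreement when new_cycle is nonempty
lemma per_cycle (new ex : List String) (hne : new ≠ []) :
    (if new.length == ex.length then
        (PySem.List.pyRange 0 (ex.length : Int) 1).any (fun i =>
          new == PySem.List.slice ex (some i) none ++ PySem.List.slice ex none (some i))
      else false)
    = (ex.length == new.length && pvOccurs new (ex ++ ex)) := by
  by_cases hlen : new.length = ex.length
  · simp only [hlen, beq_self_eq_true, if_pos, Bool.true_and]
    apply Bool.coe_iff_coe.mp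
    rw [rotScan_iff, pvOccurs_iff]
    exact (doubling new ex hne hlen).symm
  · have h1 : (new.length == ex.length) = false := by simpa using hlen
    have h2 : (ex.length == new.length) = false := by simp; omega
    simp [h1, h2]

-- when new_cycle is empty, A's scan finds nothing (range(0) is empty)
lemma per_cycle_nil (ex : List String) :
    (if ([] : List String).length == ex.length then
        (PySem.List.pyRange 0 (ex.length : Int) 1).any (fun i =>
          ([] : List String) == PySem.List.slice ex (some i) none ++ PySem.List.slice ex none (some i))
      else false) = false := by
  by_cases h : ex.length = 0
  · have : ex = [] := List.length_eq_zero_iff.mp h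
    subst this
    simp [PySem.List.pyRange_one_eq_nil]
  · simp only [List.length_nil]
    have : ((0 : Nat) == ex.length) = false := by simp; omega
    simp [this]

-- ===== VERDICT (by name: the statement is the Claim_ definition above) =====
theorem is_duplicate_cycle_py_spec : Claim_equal_is_duplicate_cycle_py := by
  intro new_cycle existing_cycles _
  unfold Spec_is_duplicate_cycle_py is_duplicate_cycle_py is_duplicate_cycle_py_alt
  by_cases hne : new_cycle = []
  · subst hne
    simp only [List.isEmpty_nil, if_pos]
    exact List.any_eq_false.mpr (fun ex _ => by simp only [per_cycle_nil ex]; simp)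
  · rw [if_neg (by simpa using hne)]
    exact List.any_congr rfl (fun ex => per_cycle new_cycle ex hne)
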